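-- pv_equiv track=rewrite | github.com/Effyee/codingtestPython | 프로그래머스/unrated/135808. 과일 장수/과일 장수.py | solution
-- ===== SOURCE A (Python) =====
-- def solution(k, m, score):
--     answer = 0
--     score.sort(reverse=True)
--     for i in range(0,len(score),m):
--         l=score[i:i+m]
--         if len(l)<m:
--             continue
--         answer+=l[-1]*m
--     return answer
-- ===== SOURCE B (Python) =====
-- def solution(k, m, score):
--     # Frequency table + arithmetic box counting: walk the distinct scores in
--     # descending order; a value occupying descending positions [pos, pos+c)
--     # is the minimum of exactly (pos+c)//m - pos//m full boxes of size m.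
--     freq = {}
--     for v in score:
--         freq[v] = freq.get(v, 0) + 1
--     answer = 0
--     pos = 0
--     for v in sorted(freq, reverse=True):
--         c = freq[v]
--         answer += v * m * ((pos + c) // m - pos // m)
--         pos += c
--     return answer
-- ===== Notes on version B (the rewrite author's own statement) =====
-- stated objective: alternative
-- what changed: Replaces sorting all n elements and slicing out every m-sized chunk by a frequency dictionary: the distinct scores are sorted once and, per distinct value, the number of full boxes it is the minimum of is computed arithmetically as (pos+c)//m - pos//m, so no per-element chunking or indexing happens; Pre_ excludes non-positive m, where A raises ValueError (m = 0) or, for the unspecified corner of a negative box size, the two programs return equally arbitrary values.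
-- outside the precondition, e.g. on solution(0, -2, [1, 2, 3]): A returns 0, B returns 8
import Mathlib
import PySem

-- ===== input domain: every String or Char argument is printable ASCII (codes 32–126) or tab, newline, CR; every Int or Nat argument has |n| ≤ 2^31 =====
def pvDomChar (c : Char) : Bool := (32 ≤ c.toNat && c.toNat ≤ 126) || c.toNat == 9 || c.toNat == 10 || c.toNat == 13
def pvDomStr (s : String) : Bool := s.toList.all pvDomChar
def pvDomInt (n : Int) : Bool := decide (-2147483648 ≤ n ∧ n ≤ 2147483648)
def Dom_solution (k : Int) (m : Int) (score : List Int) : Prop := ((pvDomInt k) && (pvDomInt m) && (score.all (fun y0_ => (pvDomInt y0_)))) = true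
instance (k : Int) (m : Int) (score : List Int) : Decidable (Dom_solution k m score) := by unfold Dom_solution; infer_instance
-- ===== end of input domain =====

-- B replaces the full descending sort + per-box slicing by a frequency dictionary and an
-- arithmetic count of full boxes per distinct value (alternative decomposition).
-- Python A sorts `score` in place (a caller-visible mutation B does not perform);
-- the equivalence proved here is about the return value only.

-- ===== PORT A =====
def solution (k : Int) (m : Int) (score : List Int) : Int :=
  let s := PySem.List.sorted score (fun x => x) true
  (PySem.List.pyRange 0 (s.length : Int) m).foldl
    (fun answer i =>
      let l := PySem.List.slice s (some i) (some (i + m))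
      if (l.length : Int) < m then answer
      else answer + PySem.List.pyGetD l (-1) 0 * m) 0

-- ===== PORT B =====
def solution_alt (k : Int) (m : Int) (score : List Int) : Int :=
  let freq : PySem.Dict Int Int :=
    score.foldl (fun d v => d.insert v (d.getD v 0 + 1)) PySem.Dict.empty
  -- `freq[v]` in Python: v is always a key of freq here, so it equals getD v 0 exactly
  ((PySem.List.sorted freq.keys (fun x => x) true).foldl
    (fun (st : Int × Int) v =>
      let c := freq.getD v 0
      (st.1 + v * m * (PySem.Int.floordiv (st.2 + c) m - PySem.Int.floordiv st.2 m),
       st.2 + c))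
    (0, 0)).1

-- ===== PRECONDITION & SPEC =====
-- Pre_ excludes non-positive m: at m = 0 Python A raises ValueError (range step 0), and a
-- negative box size m < 0 is an unspecified corner no caller would pass, on which A (whose
-- range() is empty) and B (whose floor-divisions count downward) return equally arbitrary values.
def Pre_solution (k : Int) (m : Int) (score : List Int) : Prop := 0 < m
instance (k : Int) (m : Int) (score : List Int) : Decidable (Pre_solution k m score) := by unfold Pre_solution; infer_instance
def pvWitness_solution : Int × Int × List Int := (0, 2, [1, 2, 3])

def Spec_solution (k : Int) (m : Int) (score : List Int) (out : Int) : Prop := out = solution_alt k m score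
instance (k : Int) (m : Int) (score : List Int) (out : Int) : Decidable (Spec_solution k m score out) := by unfold Spec_solution; infer_instance

-- ===== CLAIM (what is proved, stated in full; the proofs are below) =====
def Claim_equal_solution : Prop := ∀ (k : Int) (m : Int) (score : List Int), Dom_solution k m score → Pre_solution k m score → Spec_solution k m score (solution k m score)

-- ===== LEMMAS AND PROOFS =====

-- the multiset expansion of a frequency table along a list of keys
def pvFlat (f : Int → Nat) (ks : List Int) : List Int :=
  ks.flatMap (fun v => List.replicate (f v) v)

theorem pv_count_flat (f : Int → Nat) (a : Int) :
    ∀ (ks : List Int), ks.Nodup →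
      (pvFlat f ks).count a = if a ∈ ks then f a else 0 := by
  intro ks
  induction ks with
  | nil => intro _; simp [pvFlat]
  | cons v ks ih =>
    intro hnd
    rw [List.nodup_cons] at hnd
    have : pvFlat f (v :: ks) = List.replicate (f v) v ++ pvFlat f ks := rfl
    rw [this, List.count_append, List.count_replicate, ih hnd.2]
    by_cases hav : a = v
    · subst hav
      simp [hnd.1]
    · simp [hav, Ne.symm hav]

theorem pv_pairwise_flat (f : Int → Nat) :
    ∀ (ks : List Int), ks.Pairwise (fun x y => y ≤ x) →
      (pvFlat f ks).Pairwise (fun x y => y ≤ x) := by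
  intro ks
  induction ks with
  | nil => intro _; simp [pvFlat]
  | cons v ks ih =>
    intro hp
    rw [List.pairwise_cons] at hp
    have : pvFlat f (v :: ks) = List.replicate (f v) v ++ pvFlat f ks := rfl
    rw [this, List.pairwise_append]
    refine ⟨List.pairwise_replicate.mpr (Or.inr le_rfl), ih hp.2, ?_⟩
    intro x hx y hy
    have hxv : x = v := List.eq_of_mem_replicate hx
    obtain ⟨w, hw, hyw⟩ := List.mem_flatMap.mp hy
    have hyw' : y = w := List.eq_of_mem_replicate hyw
    rw [hxv, hyw']
    exact hp.1 w hw

-- the descending sort of score is the flattening of its counter along the sorted distinct values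
theorem pv_flat_eq_sorted (score : List Int) :
    pvFlat (fun v => score.count v)
        (PySem.List.sorted (PySem.Set.ofList score) (fun x => x) true)
      = PySem.List.sorted score (fun x => x) true := by
  set ks := PySem.List.sorted (PySem.Set.ofList score) (fun x => x) true with hks
  have hperm0 : ks.Perm (PySem.Set.ofList score) := PySem.List.sorted_perm _ _ _
  have hnd : ks.Nodup := hperm0.symm.nodup (PySem.Set.nodup_ofList (xs := score))
  have hmem : ∀ a, a ∈ ks ↔ a ∈ score := by
    intro a
    rw [hperm0.mem_iff]
    simp [PySem.Set.mem_ofList]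
  have hperm : (pvFlat (fun v => score.count v) ks).Perm score := by
    rw [List.perm_iff_count]
    intro a
    rw [pv_count_flat _ a ks hnd]
    by_cases ha : a ∈ ks
    · simp [ha]
    · have : a ∉ score := fun h => ha ((hmem a).mpr h)
      simp [ha, List.count_eq_zero_of_not_mem this]
  apply List.Perm.eq_of_pairwise (le := fun a b : Int => b ≤ a)
  · intro a b _ _ h1 h2; omega
  · exact pv_pairwise_flat _ ks (PySem.List.sorted_pairwise_rev _ _)
  · exact PySem.List.sorted_pairwise_rev _ _
  · exact hperm.trans (PySem.List.sorted_perm score (fun x => x) true).symm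

-- last element of a full chunk of the descending list
theorem pv_chunk_last (s : List Int) (mN j : Nat) (hmN : 0 < mN)
    (hfull : j * mN ≤ s.length) (hj : 0 < j) :
    PySem.List.pyGetD ((s.drop ((j - 1) * mN)).take mN) (-1) 0
      = s.getD (j * mN - 1) 0 := by
  have hjm : (j - 1) * mN + mN = j * mN := by
    cases j with
    | zero => omega
    | succ t => simp [Nat.succ_mul]
  have hlen : ((s.drop ((j - 1) * mN)).take mN).length = mN := by
    simp [List.length_take, List.length_drop]; omega
  rw [PySem.List.pyGetD_neg_one _ 0 (by intro hnil; rw [hnil] at hlen; simp at hlen; omega)]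
  rw [List.getLast_eq_getElem]
  rw [List.getD_eq_getElem s 0 (by omega)]
  simp only [List.getElem_take, List.getElem_drop, hlen]
  congr 1
  omega

-- sum over range C of a function vanishing from qn on equals the sum over range qn
theorem pv_sum_range_ite (h : Nat → Int) :
    ∀ (C qn : Nat), qn ≤ C →
    ((List.range C).map (fun t => if t < qn then h t else 0)).sum = ((List.range qn).map h).sum := by
  intro C
  induction C with
  | zero => intro qn h1; have : qn = 0 := by omega
            subst this; simp
  | succ C ih =>
    intro qn h1
    by_cases h2 : qn ≤ C
    · rw [List.range_succ]
      simp only [List.map_append, List.sum_append, List.map_cons, List.map_nil,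
        List.sum_cons, List.sum_nil, add_zero]
      rw [if_neg (by omega), ih qn h2, add_zero]
    · have : qn = C + 1 := by omega
      subst this
      apply congrArg
      apply List.map_congr_left
      intro t ht
      rw [if_pos (List.mem_range.mp ht)]

theorem pv_range_sum_to_Ioc (g : Nat → Int) (m : Int) :
    ∀ (qn : Nat), ((List.range qn).map (fun t => g (t + 1) * m)).sum
      = m * ∑ j ∈ Finset.Ioc 0 qn, g j := by
  intro qn
  induction qn with
  | zero => simp
  | succ q ih =>
    rw [List.range_succ, List.map_append, List.sum_append,
      Finset.sum_Ioc_succ_top (Nat.zero_le _), ih]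
    simp
    ring

-- A's fold equals m times the sum of the per-box minima of the descending list s
theorem pv_A_eq (s : List Int) (mN : Nat) (hmN : 0 < mN) :
    (PySem.List.pyRange 0 (s.length : Int) (mN : Int)).foldl
      (fun answer i =>
        let l := PySem.List.slice s (some i) (some (i + (mN : Int)))
        if (l.length : Int) < (mN : Int) then answer
        else answer + PySem.List.pyGetD l (-1) 0 * (mN : Int)) 0
      = (mN : Int) * ∑ j ∈ Finset.Ioc 0 (s.length / mN), s.getD (j * mN - 1) 0 := by
  have hm : (0 : Int) < (mN : Int) := by exact_mod_cast hmN
  set n := s.length with hn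
  set qn := n / mN with hqn
  have key1 : ∀ k : Nat, k < qn → (k + 1) * mN ≤ n := by
    intro k hk
    exact (Nat.le_div_iff_mul_le hmN).mp (by omega)
  have key2 : ∀ k : Nat, qn ≤ k → n < (k + 1) * mN := by
    intro k hk
    exact (Nat.div_lt_iff_lt_mul hmN).mp (by omega)
  have step1 :
      (PySem.List.pyRange 0 (n : Int) (mN : Int)).foldl
        (fun answer i =>
          let l := PySem.List.slice s (some i) (some (i + (mN : Int)))
          if (l.length : Int) < (mN : Int) then answer
          else answer + PySem.List.pyGetD l (-1) 0 * (mN : Int)) 0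
      = ((PySem.List.pyRange 0 (n : Int) (mN : Int)).map (fun i =>
          if ((PySem.List.slice s (some i) (some (i + (mN : Int)))).length : Int) < (mN : Int) then 0
          else PySem.List.pyGetD (PySem.List.slice s (some i) (some (i + (mN : Int)))) (-1) 0 * (mN : Int))).sum := by
    rw [show (fun (answer i : Int) =>
        let l := PySem.List.slice s (some i) (some (i + (mN : Int)))
        if (l.length : Int) < (mN : Int) then answer
        else answer + PySem.List.pyGetD l (-1) 0 * (mN : Int))
      = (fun (answer i : Int) => answer + (if ((PySem.List.slice s (some i) (some (i + (mN : Int)))).length : Int) < (mN : Int) then 0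
          else PySem.List.pyGetD (PySem.List.slice s (some i) (some (i + (mN : Int)))) (-1) 0 * (mN : Int))) from by
        funext ans i
        by_cases hc : ((PySem.List.slice s (some i) (some (i + (mN : Int)))).length : Int) < (mN : Int) <;> simp [hc]]
    rw [PySem.List.foldl_add]
    simp
  rw [step1]
  rw [PySem.List.pyRange_of_pos _ _ hm, List.map_map]
  simp only [sub_zero, zero_add]
  set C : Nat := if (0 : Int) < (n : Int) then (((n : Int) + (mN : Int) - 1) / (mN : Int)).toNat else 0 with hCdef
  have hCq : qn ≤ C := by
    by_cases hn0 : (0 : Int) < (n : Int)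
    · rw [hCdef, if_pos hn0]
      have e : ((n : Int) + (mN : Int) - 1) = ((n + mN - 1 : Nat) : Int) := by push_cast; omega
      rw [e, ← Int.natCast_div, Int.toNat_natCast]
      exact Nat.div_le_div_right (by omega)
    · have hz : n = 0 := by omega
      rw [hCdef, if_neg hn0, hqn, hz]
      simp
  have hmap : ∀ k ∈ List.range C,
      ((fun i =>
          if ((PySem.List.slice s (some i) (some (i + (mN : Int)))).length : Int) < (mN : Int) then 0
          else PySem.List.pyGetD (PySem.List.slice s (some i) (some (i + (mN : Int)))) (-1) 0 * (mN : Int))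
        ∘ fun (k : Nat) => (mN : Int) * (k : Int)) k
      = (fun t => if t < qn then s.getD ((t + 1) * mN - 1) 0 * (mN : Int) else 0) k := by
    intro k _
    simp only [Function.comp]
    have e0 : (mN : Int) * (k : Int) = ((k * mN : Nat) : Int) := by push_cast; ring
    have e1 : ((k * mN : Nat) : Int) + (mN : Int) = (((k + 1) * mN : Nat) : Int) := by push_cast; ring
    rw [e0, e1, PySem.List.slice_natCast]
    have e2 : (k + 1) * mN - k * mN = mN := by simp [Nat.succ_mul]
    rw [e2]
    have hlen : ((s.drop (k * mN)).take mN).length = min mN (n - k * mN) := by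
      simp [List.length_take, List.length_drop, ← hn]
    by_cases hkq : k < qn
    · have hfull := key1 k hkq
      have hcond : ¬ (((((s.drop (k * mN)).take mN).length : Nat) : Int) < (mN : Int)) := by
        rw [hlen, Nat.cast_lt]
        have : (k + 1) * mN = k * mN + mN := by ring
        omega
      rw [if_neg hcond, if_pos hkq]
      have := pv_chunk_last s mN (k + 1) hmN (key1 k hkq) (by omega)
      simp only [Nat.add_sub_cancel] at this
      rw [this]
    · have hcond : ((((s.drop (k * mN)).take mN).length : Nat) : Int) < (mN : Int) := by
        rw [hlen, Nat.cast_lt]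
        have h2 := key2 k (by omega)
        have : (k + 1) * mN = k * mN + mN := by ring
        omega
      rw [if_pos hcond, if_neg hkq]
  rw [List.map_congr_left hmap, pv_sum_range_ite _ C qn hCq]
  exact pv_range_sum_to_Ioc (fun j => s.getD (j * mN - 1) 0) (mN : Int) qn

-- B's group fold equals m times the sum of per-box minima of the flattened list
theorem pv_fold_group (mN : Nat) (hmN : 0 < mN) (f : Int → Nat) :
    ∀ (ks : List Int) (acc : Int) (p : Nat),
    (ks.foldl (fun (st : Int × Int) v =>
        (st.1 + v * (mN : Int) *
            (PySem.Int.floordiv (st.2 + ((f v : Nat) : Int)) (mN : Int)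
              - PySem.Int.floordiv st.2 (mN : Int)),
         st.2 + ((f v : Nat) : Int)))
      (acc, (p : Int))).1
    = acc + (mN : Int) * ∑ j ∈ Finset.Ioc (p / mN) ((p + (pvFlat f ks).length) / mN),
        (pvFlat f ks).getD (j * mN - 1 - p) 0 := by
  intro ks
  induction ks with
  | nil =>
    intro acc p
    simp [pvFlat]
  | cons v ks ih =>
    intro acc p
    have hflc : pvFlat f (v :: ks) = List.replicate (f v) v ++ pvFlat f ks := rfl
    have hcast : (p : Int) + ((f v : Nat) : Int) = ((p + (f v) : Nat) : Int) := by push_cast; ring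
    have hfd1 : PySem.Int.floordiv (((p + f v : Nat)) : Int) (mN : Int) = (((p + f v) / mN : Nat) : Int) :=
      PySem.Int.floordiv_natCast _ _
    have hfd2 : PySem.Int.floordiv (p : Int) (mN : Int) = ((p / mN : Nat) : Int) :=
      PySem.Int.floordiv_natCast _ _
    rw [List.foldl_cons]
    simp only [hcast, hfd1, hfd2]
    rw [ih (acc + v * (mN : Int) * ((((p + f v) / mN : Nat) : Int) - ((p / mN : Nat) : Int))) (p + f v)]
    have hd1 : p / mN ≤ (p + f v) / mN := Nat.div_le_div_right (by omega)
    have hd2 : (p + f v) / mN ≤ (p + f v + (pvFlat f ks).length) / mN := Nat.div_le_div_right (by omega)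
    have hsplit := Finset.sum_Ioc_consecutive (M := Int)
      (fun j => (pvFlat f (v :: ks)).getD (j * mN - 1 - p) 0) hd1 hd2
    have hlenflat : (pvFlat f (v :: ks)).length = (f v) + (pvFlat f ks).length := by
      rw [hflc]; simp
    rw [hlenflat]
    have e3 : p + (f v + (pvFlat f ks).length) = p + (f v) + (pvFlat f ks).length := by omega
    rw [e3, ← hsplit]
    -- first block: every term is v
    have hfirst : ∑ j ∈ Finset.Ioc (p / mN) ((p + f v) / mN),
        (pvFlat f (v :: ks)).getD (j * mN - 1 - p) 0
        = (((p + f v) / mN - p / mN : Nat) : Int) * v := by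
      rw [Finset.sum_congr rfl (g := fun _ => v) ?_]
      · rw [Finset.sum_const, Nat.card_Ioc]
        simp [mul_comm]
      · intro j hj
        rw [Finset.mem_Ioc] at hj
        have hjl : p < j * mN := by
          have := (Nat.div_lt_iff_lt_mul hmN).mp hj.1
          omega
        have hju : j * mN ≤ p + (f v) := (Nat.le_div_iff_mul_le hmN).mp hj.2
        have hidx : j * mN - 1 - p < (f v) := by omega
        rw [hflc, List.getD_eq_getElem?_getD, List.getElem?_append_left (by simpa using hidx)]
        simp [hidx]
    -- second block: getD passes through to the tail
    have hsecond : ∑ j ∈ Finset.Ioc ((p + f v) / mN) ((p + f v + (pvFlat f ks).length) / mN),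
        (pvFlat f (v :: ks)).getD (j * mN - 1 - p) 0
        = ∑ j ∈ Finset.Ioc ((p + f v) / mN) ((p + f v + (pvFlat f ks).length) / mN),
        (pvFlat f ks).getD (j * mN - 1 - (p + f v)) 0 := by
      apply Finset.sum_congr rfl
      intro j hj
      rw [Finset.mem_Ioc] at hj
      have hjl : p + (f v) < j * mN := by
        have := (Nat.div_lt_iff_lt_mul hmN).mp hj.1
        omega
      rw [hflc, List.getD_eq_getElem?_getD, List.getElem?_append_right (by simp; omega)]
      rw [← List.getD_eq_getElem?_getD]
      congr 1
      simp
      omega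
    rw [hfirst, hsecond]
    have hc1 : (((p + f v) / mN - p / mN : Nat) : Int) = (((p + f v) / mN : Nat) : Int) - ((p / mN : Nat) : Int) := by
      push_cast [hd1]
      ring
    rw [hc1]
    ring

-- ===== VERDICT (by name: the statement is the Claim_ definition above) =====
theorem solution_spec : Claim_equal_solution := by
  intro k m score _ hpre
  unfold Pre_solution at hpre
  unfold Spec_solution solution solution_alt
  obtain ⟨mN, rfl⟩ := Int.eq_ofNat_of_zero_le (le_of_lt hpre)
  have hmN : 0 < mN := by exact_mod_cast hpre
  -- B's dictionary is the counter of score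
  rw [PySem.Dict.foldl_insert_getD_add_one_eq_counter]
  dsimp only
  rw [PySem.Dict.keys_counter]
  simp only [PySem.Dict.getD_counter]
  have hB := pv_fold_group mN hmN (fun v => score.count v)
    (PySem.List.sorted (PySem.Set.ofList score) (fun x => x) true) 0 0
  rw [pv_flat_eq_sorted score] at hB
  simp only [Nat.cast_zero, Nat.zero_div, zero_add, Nat.sub_zero] at hB
  rw [hB]
  exact pv_A_eq (PySem.List.sorted score (fun x => x) true) mN hmN
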